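-- pv_equiv track=rewrite | github.com/ryouma-dqwalk/atcorder | 20200618/C.py | slove_w
-- ===== SOURCE A (Python) =====
-- def slove_w(p1,p2,p3,w1,w2,w3):
--   cnt=0
--   for i in range(len(p1)):
--     for j in range(len(p2)):
--       for k in range(len(p3)):
--         if p1[i][0]+p2[j][0]+p3[k][0]==w1 and \
--           p1[i][1]+p2[j][1]+p3[k][1]==w2 and \
--           p1[i][2]+p2[j][2]+p3[k][2]==w3:
--           cnt+=1
--   return cnt
-- ===== SOURCE B (Python) =====
-- def slove_w(p1, p2, p3, w1, w2, w3):
--     table = {}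
--     for z in p3:
--         key = (z[0], z[1], z[2])
--         table[key] = table.get(key, 0) + 1
--     total = 0
--     for x in p1:
--         for y in p2:
--             total += table.get((w1 - x[0] - y[0], w2 - x[1] - y[1], w3 - x[2] - y[2]), 0)
--     return total
-- ===== Notes on version B (the rewrite author's own statement) =====
-- stated objective: faster
-- what changed: Replaces the triple nested scan by a meet-in-the-middle: build a hash counter of the coordinate triples of p3 once, then for each pair from p1 x p2 look up the complementary triple, removing the inner loop over p3.
-- outside the precondition, e.g. on slove_w([], [], [[0]], 0, 0, 0): A returns 0, B raises IndexError; on slove_w([[5]], [[0]], [[0]], 1, 0, 0): A returns 0, B raises IndexError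
import Mathlib
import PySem

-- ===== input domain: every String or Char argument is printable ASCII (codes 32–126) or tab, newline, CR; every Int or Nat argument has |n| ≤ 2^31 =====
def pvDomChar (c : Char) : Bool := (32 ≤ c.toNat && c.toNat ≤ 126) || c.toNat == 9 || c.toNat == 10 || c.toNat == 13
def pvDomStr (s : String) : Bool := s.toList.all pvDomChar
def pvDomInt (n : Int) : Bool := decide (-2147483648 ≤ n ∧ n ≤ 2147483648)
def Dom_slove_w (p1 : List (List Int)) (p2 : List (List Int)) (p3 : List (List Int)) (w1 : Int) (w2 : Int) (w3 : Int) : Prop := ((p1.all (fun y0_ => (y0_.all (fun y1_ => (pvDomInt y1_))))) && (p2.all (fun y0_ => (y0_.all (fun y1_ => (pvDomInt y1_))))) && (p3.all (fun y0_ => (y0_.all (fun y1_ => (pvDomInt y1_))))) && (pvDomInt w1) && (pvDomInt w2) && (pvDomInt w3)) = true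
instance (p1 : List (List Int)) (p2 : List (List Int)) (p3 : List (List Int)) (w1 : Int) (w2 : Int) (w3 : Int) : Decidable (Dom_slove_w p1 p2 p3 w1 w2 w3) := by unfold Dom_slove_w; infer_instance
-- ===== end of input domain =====

-- B replaces A's triple nested scan by a hash counter of p3's coordinate triples plus a
-- complement lookup per (p1, p2) pair; objective: faster (removes the inner loop over p3).

-- ===== PORT A =====
-- literal port of A's triple index loop; pyGetD is exact under Pre_ (all indices in range there)
def slove_w (p1 : List (List Int)) (p2 : List (List Int)) (p3 : List (List Int)) (w1 : Int) (w2 : Int) (w3 : Int) : Int :=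
  (PySem.List.pyRange 0 (PySem.List.len p1) 1).foldl (fun cnt i =>
    (PySem.List.pyRange 0 (PySem.List.len p2) 1).foldl (fun cnt j =>
      (PySem.List.pyRange 0 (PySem.List.len p3) 1).foldl (fun cnt k =>
        if (PySem.List.pyGetD (PySem.List.pyGetD p1 i []) 0 0 + PySem.List.pyGetD (PySem.List.pyGetD p2 j []) 0 0 + PySem.List.pyGetD (PySem.List.pyGetD p3 k []) 0 0 == w1) &&
           (PySem.List.pyGetD (PySem.List.pyGetD p1 i []) 1 0 + PySem.List.pyGetD (PySem.List.pyGetD p2 j []) 1 0 + PySem.List.pyGetD (PySem.List.pyGetD p3 k []) 1 0 == w2) &&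
           (PySem.List.pyGetD (PySem.List.pyGetD p1 i []) 2 0 + PySem.List.pyGetD (PySem.List.pyGetD p2 j []) 2 0 + PySem.List.pyGetD (PySem.List.pyGetD p3 k []) 2 0 == w3)
        then cnt + 1 else cnt) cnt) cnt) 0

-- ===== PORT B =====
-- B-side helpers: the coordinate-triple key of a row, and the counter table built from p3
def pvKey3 (z : List Int) : Int × Int × Int :=
  (PySem.List.pyGetD z 0 0, PySem.List.pyGetD z 1 0, PySem.List.pyGetD z 2 0)
def pvTable (p3 : List (List Int)) : PySem.Dict (Int × Int × Int) Int :=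
  p3.foldl (fun d z => d.insert (pvKey3 z) (d.getD (pvKey3 z) 0 + 1)) PySem.Dict.empty
def slove_w_alt (p1 : List (List Int)) (p2 : List (List Int)) (p3 : List (List Int)) (w1 : Int) (w2 : Int) (w3 : Int) : Int :=
  p1.foldl (fun tot x =>
    p2.foldl (fun tot y =>
      tot + (pvTable p3).getD (w1 - PySem.List.pyGetD x 0 0 - PySem.List.pyGetD y 0 0,
                               w2 - PySem.List.pyGetD x 1 0 - PySem.List.pyGetD y 1 0,
                               w3 - PySem.List.pyGetD x 2 0 - PySem.List.pyGetD y 2 0) 0) tot) 0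

-- ===== PRECONDITION & SPEC =====
-- Pre_ excludes inputs with an inner list shorter than 3: there A either raises IndexError or
-- returns 0 only by accident of `and`-short-circuiting / an empty outer list, while B's
-- unconditional triple indexing raises.
def Pre_slove_w (p1 : List (List Int)) (p2 : List (List Int)) (p3 : List (List Int)) (w1 : Int) (w2 : Int) (w3 : Int) : Prop :=
  (∀ l ∈ p1, 3 ≤ l.length) ∧ (∀ l ∈ p2, 3 ≤ l.length) ∧ (∀ l ∈ p3, 3 ≤ l.length)
instance (p1 : List (List Int)) (p2 : List (List Int)) (p3 : List (List Int)) (w1 : Int) (w2 : Int) (w3 : Int) : Decidable (Pre_slove_w p1 p2 p3 w1 w2 w3) := by unfold Pre_slove_w; infer_instance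
def pvWitness_slove_w : List (List Int) × List (List Int) × List (List Int) × Int × Int × Int :=
  ([[1, 2, 3]], [[0, 1, 0], [2, 0, 0]], [[0, 0, 0], [-1, 0, 0]], 3, 3, 3)
def Spec_slove_w (p1 : List (List Int)) (p2 : List (List Int)) (p3 : List (List Int)) (w1 : Int) (w2 : Int) (w3 : Int) (out : Int) : Prop := out = slove_w_alt p1 p2 p3 w1 w2 w3
instance (p1 : List (List Int)) (p2 : List (List Int)) (p3 : List (List Int)) (w1 : Int) (w2 : Int) (w3 : Int) (out : Int) : Decidable (Spec_slove_w p1 p2 p3 w1 w2 w3 out) := by unfold Spec_slove_w; infer_instance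

-- ===== CLAIM (what is proved, stated in full; the proofs are below) =====
def Claim_equal_slove_w : Prop := ∀ (p1 : List (List Int)) (p2 : List (List Int)) (p3 : List (List Int)) (w1 : Int) (w2 : Int) (w3 : Int), Dom_slove_w p1 p2 p3 w1 w2 w3 → Pre_slove_w p1 p2 p3 w1 w2 w3 → Spec_slove_w p1 p2 p3 w1 w2 w3 (slove_w p1 p2 p3 w1 w2 w3)

-- ===== LEMMAS AND PROOFS =====

-- the table B builds is the counter of p3's key triples
theorem pvTable_eq_counter (p3 : List (List Int)) :
    pvTable p3 = PySem.Dict.counter (p3.map pvKey3) := by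
  rw [pvTable, ← PySem.Dict.foldl_insert_getD_add_one_eq_counter, List.foldl_map]

-- A's three-way sum test is the key-equality test B performs
theorem pvCond_eq_key (a b z : List Int) (w1 w2 w3 : Int) :
    ((PySem.List.pyGetD a 0 0 + PySem.List.pyGetD b 0 0 + PySem.List.pyGetD z 0 0 == w1) &&
     (PySem.List.pyGetD a 1 0 + PySem.List.pyGetD b 1 0 + PySem.List.pyGetD z 1 0 == w2) &&
     (PySem.List.pyGetD a 2 0 + PySem.List.pyGetD b 2 0 + PySem.List.pyGetD z 2 0 == w3))
    = (pvKey3 z == (w1 - PySem.List.pyGetD a 0 0 - PySem.List.pyGetD b 0 0,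
                    w2 - PySem.List.pyGetD a 1 0 - PySem.List.pyGetD b 1 0,
                    w3 - PySem.List.pyGetD a 2 0 - PySem.List.pyGetD b 2 0)) := by
  rw [Bool.eq_iff_iff]
  simp only [Bool.and_eq_true, beq_iff_eq, pvKey3, Prod.mk.injEq]
  omega

-- A's index loops are folds over the lists themselves
theorem pvA_eq_list_fold (p1 p2 p3 : List (List Int)) (w1 w2 w3 : Int) :
    slove_w p1 p2 p3 w1 w2 w3 =
    p1.foldl (fun cnt a =>
      p2.foldl (fun cnt b =>
        p3.foldl (fun cnt z =>
          if (PySem.List.pyGetD a 0 0 + PySem.List.pyGetD b 0 0 + PySem.List.pyGetD z 0 0 == w1) &&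
             (PySem.List.pyGetD a 1 0 + PySem.List.pyGetD b 1 0 + PySem.List.pyGetD z 1 0 == w2) &&
             (PySem.List.pyGetD a 2 0 + PySem.List.pyGetD b 2 0 + PySem.List.pyGetD z 2 0 == w3)
          then cnt + 1 else cnt) cnt) cnt) 0 := by
  unfold slove_w
  rw [PySem.List.foldl_pyRange_zero_pyGetD p1 []
      (fun cnt a =>
        (PySem.List.pyRange 0 (PySem.List.len p2) 1).foldl (fun cnt j =>
          (PySem.List.pyRange 0 (PySem.List.len p3) 1).foldl (fun cnt k =>
            if (PySem.List.pyGetD a 0 0 + PySem.List.pyGetD (PySem.List.pyGetD p2 j []) 0 0 + PySem.List.pyGetD (PySem.List.pyGetD p3 k []) 0 0 == w1) &&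
               (PySem.List.pyGetD a 1 0 + PySem.List.pyGetD (PySem.List.pyGetD p2 j []) 1 0 + PySem.List.pyGetD (PySem.List.pyGetD p3 k []) 1 0 == w2) &&
               (PySem.List.pyGetD a 2 0 + PySem.List.pyGetD (PySem.List.pyGetD p2 j []) 2 0 + PySem.List.pyGetD (PySem.List.pyGetD p3 k []) 2 0 == w3)
            then cnt + 1 else cnt) cnt) cnt) 0]
  apply PySem.List.foldl_congr_mem'
  intro a _ cnt
  rw [PySem.List.foldl_pyRange_zero_pyGetD p2 []
      (fun cnt b =>
        (PySem.List.pyRange 0 (PySem.List.len p3) 1).foldl (fun cnt k =>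
          if (PySem.List.pyGetD a 0 0 + PySem.List.pyGetD b 0 0 + PySem.List.pyGetD (PySem.List.pyGetD p3 k []) 0 0 == w1) &&
             (PySem.List.pyGetD a 1 0 + PySem.List.pyGetD b 1 0 + PySem.List.pyGetD (PySem.List.pyGetD p3 k []) 1 0 == w2) &&
             (PySem.List.pyGetD a 2 0 + PySem.List.pyGetD b 2 0 + PySem.List.pyGetD (PySem.List.pyGetD p3 k []) 2 0 == w3)
          then cnt + 1 else cnt) cnt) cnt]
  apply PySem.List.foldl_congr_mem'
  intro b _ cnt
  rw [PySem.List.foldl_pyRange_zero_pyGetD p3 []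
      (fun cnt z =>
        if (PySem.List.pyGetD a 0 0 + PySem.List.pyGetD b 0 0 + PySem.List.pyGetD z 0 0 == w1) &&
           (PySem.List.pyGetD a 1 0 + PySem.List.pyGetD b 1 0 + PySem.List.pyGetD z 1 0 == w2) &&
           (PySem.List.pyGetD a 2 0 + PySem.List.pyGetD b 2 0 + PySem.List.pyGetD z 2 0 == w3)
        then cnt + 1 else cnt) cnt]

-- ===== VERDICT (by name: the statement is the Claim_ definition above) =====
theorem slove_w_spec : Claim_equal_slove_w := by
  intro p1 p2 p3 w1 w2 w3 _ _
  unfold Spec_slove_w slove_w_alt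
  rw [pvA_eq_list_fold]
  simp only [pvTable_eq_counter, PySem.Dict.getD_counter, PySem.List.foldl_if_add_one]
  apply PySem.List.foldl_congr_mem'
  intro a _ tot
  apply PySem.List.foldl_congr_mem'
  intro b _ tot
  congr 1
  rw [List.count_eq_countP, List.countP_map]
  refine congrArg _ ?_
  apply List.countP_congr
  intro z _
  have h := pvCond_eq_key a b z w1 w2 w3
  rw [Bool.eq_iff_iff] at h
  simp only [Bool.and_eq_true, beq_iff_eq] at h
  simp only [Function.comp]
  rw [Bool.eq_iff_iff]
  simp only [Bool.and_eq_true, beq_iff_eq]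
  tauto
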